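-- pv_equiv track=rewrite | github.com/JovanBatnozic-TomTom/tileid-utils | tileid2packed.py | to_packed_tile_id
-- ===== SOURCE A (Python) =====
-- def to_packed_tile_id(level, x, y):
--   highest_level = 15
--   result = 1 << (highest_level - level + 1)
--   level_mask = 1 << level
--   result |= (~x & level_mask) >> level
--   if level > 0:
--     level -= 1
--     level_mask >>= 1
--     result <<= 1
--     result |= (y & level_mask) >> level
--     result <<= 1
--     result |= (x & level_mask) >> level
--     y = ~y
--     while level > 0:
--       level -= 1
--       level_mask >>= 1;
--       result <<= 1;
--       result |= (y & level_mask) >> level;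
--       result <<= 1;
--       result |= (x & level_mask) >> level;
--   return result
-- ===== SOURCE B (Python) =====
-- def interleave(x, y):
--     # Morton-interleave, bottom-up: bits of x land on even positions, bits of y on odd ones.
--     # (The <= guard only makes the recursion well-founded; callers pass non-negative values.)
--     if x <= 0 and y <= 0:
--         return 0
--     return (x & 1) + 2 * (y & 1) + 4 * interleave(x >> 1, y >> 1)
--
--
-- def to_packed_tile_id(level, x, y):
--     # bits 0..level of x, with the bit at position `level` flipped
--     xbits = (x ^ (1 << level)) & ((1 << (level + 1)) - 1)
--     # bits 0..level-1 of y, all flipped except the bit at position level-1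
--     ybits = (y ^ ((1 << level) - 1 >> 1)) & ((1 << level) - 1)
--     return (1 << (16 + level)) | interleave(xbits, ybits)
-- ===== Notes on version B (the rewrite author's own statement) =====
-- stated objective: alternative
-- what changed: A builds the id top-down, shifting an accumulator left two bits per level and flipping y mid-loop; B first isolates the used bit ranges with explicit XOR/AND masks (flip x's bit at `level`, flip y's low bits except the top one) and then Morton-interleaves the two masked values bottom-up with a recursive helper, OR-ing in the sentinel bit at the end. Pre_ excludes level<0 and level>16, where A raises ValueError (negative shift count).
import Mathlib
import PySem

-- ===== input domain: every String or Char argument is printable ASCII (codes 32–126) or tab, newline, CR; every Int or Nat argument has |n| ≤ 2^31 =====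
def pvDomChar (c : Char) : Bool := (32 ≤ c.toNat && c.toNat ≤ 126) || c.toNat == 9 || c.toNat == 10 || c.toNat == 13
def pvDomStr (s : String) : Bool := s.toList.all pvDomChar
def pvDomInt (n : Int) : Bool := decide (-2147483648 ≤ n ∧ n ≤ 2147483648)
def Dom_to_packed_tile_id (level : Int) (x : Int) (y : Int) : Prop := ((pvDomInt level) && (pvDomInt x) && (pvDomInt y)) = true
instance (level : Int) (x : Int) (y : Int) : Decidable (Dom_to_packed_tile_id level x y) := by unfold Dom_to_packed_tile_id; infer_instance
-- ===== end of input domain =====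

-- B replaces A's top-down shift-accumulator loop (with its mid-loop `y = ~y`) by explicit
-- XOR/AND bit masking followed by a bottom-up recursive Morton interleave; same cost, clearer structure.

-- Python `a << n` for n ≥ 0 is exactly a * 2^n (negative n raises; excluded by Pre_).
def pyShl (a : Int) (n : Int) : Int := a * 2 ^ n.toNat
-- Python `a >> n` for n ≥ 0 is floor division by 2^n; Lean's Int `/` (ediv) agrees for the positive divisor 2^n.
def pyShr (a : Int) (n : Int) : Int := a / 2 ^ n.toNat

-- ===== PORT A =====
-- the `while level > 0` loop: fuel = the (non-negative) value of `level` at loop entry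
def pyLoopA : Nat → Int → Int → Int → Int → Int
  | 0, _, result, _, _ => result
  | k + 1, level_mask, result, x, y =>
    -- level -= 1  (new level value = k)
    let level_mask := pyShr level_mask 1
    let result := Int.lor (pyShl result 1) (pyShr (Int.land y level_mask) (k : Int))
    let result := Int.lor (pyShl result 1) (pyShr (Int.land x level_mask) (k : Int))
    pyLoopA k level_mask result x y

def to_packed_tile_id (level : Int) (x : Int) (y : Int) : Int :=
  let highest_level : Int := 15
  let result := pyShl 1 (highest_level - level + 1)
  let level_mask := pyShl 1 level
  let result := Int.lor result (pyShr (Int.land (Int.lnot x) level_mask) level)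
  if level > 0 then
    let level' := level - 1
    let level_mask := pyShr level_mask 1
    let result := Int.lor (pyShl result 1) (pyShr (Int.land y level_mask) level')
    let result := Int.lor (pyShl result 1) (pyShr (Int.land x level_mask) level')
    let y := Int.lnot y
    pyLoopA level'.toNat level_mask result x y
  else
    result

-- ===== PORT B =====
-- bottom-up Morton interleave (Source B's recursive helper)
def interleaveB (x : Int) (y : Int) : Int :=
  if x ≤ 0 ∧ y ≤ 0 then 0
  else Int.land x 1 + 2 * Int.land y 1 + 4 * interleaveB (pyShr x 1) (pyShr y 1)
  termination_by x.toNat + y.toNat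
  decreasing_by
    simp only [pyShr, Int.toNat_one, pow_one]
    omega

def to_packed_tile_id_alt (level : Int) (x : Int) (y : Int) : Int :=
  let xbits := Int.land (Int.xor x (pyShl 1 level)) (pyShl 1 (level + 1) - 1)
  let ybits := Int.land (Int.xor y (pyShr (pyShl 1 level - 1) 1)) (pyShl 1 level - 1)
  Int.lor (pyShl 1 (16 + level)) (interleaveB xbits ybits)

-- ===== PRECONDITION & SPEC =====
-- A raises ValueError ("negative shift count") for level < 0 (and, via 1 << (16 - level), for level > 16).
def Pre_to_packed_tile_id (level : Int) (x : Int) (y : Int) : Prop := 0 ≤ level ∧ level ≤ 16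
instance (level : Int) (x : Int) (y : Int) : Decidable (Pre_to_packed_tile_id level x y) := by unfold Pre_to_packed_tile_id; infer_instance
def pvWitness_to_packed_tile_id : Int × Int × Int := (2, 1, 2)

def Spec_to_packed_tile_id (level : Int) (x : Int) (y : Int) (out : Int) : Prop := out = to_packed_tile_id_alt level x y
instance (level : Int) (x : Int) (y : Int) (out : Int) : Decidable (Spec_to_packed_tile_id level x y out) := by unfold Spec_to_packed_tile_id; infer_instance

-- ===== CLAIM (what is proved, stated in full; the proofs are below) =====
def Claim_equal_to_packed_tile_id : Prop := ∀ (level : Int) (x : Int) (y : Int), Dom_to_packed_tile_id level x y → Pre_to_packed_tile_id level x y → Spec_to_packed_tile_id level x y (to_packed_tile_id level x y)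

-- ===== LEMMAS AND PROOFS =====

-- the k-th bit of an integer, as a natural number (0 or 1)
def tbn (m : Int) (k : Nat) : Nat := (m.testBit k).toNat

-- the low k bits of a and b, Morton-interleaved (a on even, b on odd positions)
def FN (k : Nat) (a b : Int) : Nat := ∑ i ∈ Finset.range k, (tbn a i + 2 * tbn b i) * 4 ^ i

theorem tbn_le (m : Int) (k : Nat) : tbn m k ≤ 1 := Bool.toNat_le _

theorem int_lor_natCast (a b : Nat) : Int.lor ↑a ↑b = ↑(a ||| b) := rfl
theorem int_land_natCast (a b : Nat) : Int.land ↑a ↑b = ↑(a &&& b) := rfl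
theorem int_land_negSucc (a b : Nat) : Int.land (Int.negSucc a) ↑b = ↑(Nat.ldiff b a) := rfl
theorem int_testBit_natCast (a : Nat) (k : Nat) : Int.testBit ↑a k = Nat.testBit a k := rfl
theorem int_testBit_negSucc (a : Nat) (k : Nat) : Int.testBit (Int.negSucc a) k = !(Nat.testBit a k) := rfl

theorem natCast_pyShr (a k : Nat) : pyShr ↑a ↑k = ↑(a / 2 ^ k) := by
  simp only [pyShr, Int.toNat_natCast]
  rw [Int.natCast_div]
  push_cast
  ring_nf

theorem pyShl_two (a : Int) : pyShl a 1 = a * 2 := by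
  simp [pyShl]

-- a &&& 2^k isolates bit k
theorem land_two_pow (m : Int) (k : Nat) :
    Int.land m (Nat.cast (2 ^ k)) = ↑(tbn m k * 2 ^ k) := by
  cases m with
  | ofNat a =>
    show Int.land (Int.ofNat a) (Int.ofNat (2 ^ k)) = _
    rw [show Int.land (Int.ofNat a) (Int.ofNat (2 ^ k)) = Int.ofNat (a &&& 2 ^ k) from rfl,
      Nat.and_two_pow]
    rfl
  | negSucc a =>
    rw [int_land_negSucc]
    congr 1
    apply Nat.eq_of_testBit_eq
    intro i
    rw [Nat.testBit_ldiff, Nat.testBit_two_pow]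
    simp only [tbn, int_testBit_negSucc]
    cases hb : a.testBit k with
    | true =>
      simp only [Bool.not_true, Bool.toNat_false, Nat.zero_mul, Nat.zero_testBit]
      by_cases h : k = i
      · subst h; simp [hb]
      · simp [h]
    | false =>
      simp only [Bool.not_false, Bool.toNat_true, Nat.one_mul, Nat.testBit_two_pow]
      by_cases h : k = i
      · subst h; simp [hb]
      · simp [h]

-- (m &&& 2^k) >> k is bit k of m
theorem extract_bit (m : Int) (k : Nat) :
    pyShr (Int.land m (Nat.cast (2 ^ k))) ↑k = ↑(tbn m k) := by
  rw [land_two_pow, natCast_pyShr, Nat.mul_div_cancel _ (Nat.two_pow_pos k)]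

theorem two_mul_lor (r t : Nat) (ht : t ≤ 1) : 2 * r ||| t = 2 * r + t := by
  have h1 : 2 * r = Nat.bit false r := by simp [Nat.bit]
  have h2 : t = Nat.bit (decide (t = 1)) 0 := by interval_cases t <;> rfl
  rw [h1, h2, Nat.lor_bit]
  interval_cases t <;> simp [Nat.bit]

theorem int_two_mul_lor (r t : Nat) (ht : t ≤ 1) :
    Int.lor (↑r * 2) ↑t = ↑(2 * r + t) := by
  have h : (↑r * 2 : Int) = Nat.cast (2 * r) := by push_cast; ring
  rw [h, int_lor_natCast, two_mul_lor r t ht]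

theorem pow_lor_of_lt (n : Nat) : ∀ s : Nat, s < 2 ^ n → 2 ^ n ||| s = 2 ^ n + s := by
  induction n with
  | zero => intro s hs; interval_cases s; decide
  | succ n ih =>
    intro s hs
    have hp : 2 ^ (n + 1) = 2 * 2 ^ n := by ring
    obtain ⟨q, b, hb, rfl⟩ : ∃ q b, b ≤ 1 ∧ s = 2 * q + b := ⟨s / 2, s % 2, by omega, by omega⟩
    have hq : q < 2 ^ n := by omega
    have h2 : 2 ^ (n + 1) = Nat.bit false (2 ^ n) := by
      simp [Nat.bit]; omega
    rcases Nat.le_one_iff_eq_zero_or_eq_one.mp hb with rfl | rfl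
    · have h1 : 2 * q + 0 = Nat.bit false q := by
        simp [Nat.bit]
      rw [h1, h2, Nat.lor_bit, ih q hq]
      simp [Nat.bit]
      omega
    · have h1 : 2 * q + 1 = Nat.bit true q := by
        simp [Nat.bit]
      rw [h1, h2, Nat.lor_bit, ih q hq]
      simp [Nat.bit]
      omega

theorem pow_lor_pow_add (n : Nat) : ∀ q : Nat, q < 2 ^ n → 2 ^ n ||| (2 ^ n + q) = 2 ^ n + q := by
  induction n with
  | zero => intro q hq; interval_cases q; decide
  | succ n ih =>
    intro q hq
    have hp : 2 ^ (n + 1) = 2 * 2 ^ n := by ring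
    obtain ⟨q2, b, hb, rfl⟩ : ∃ q2 b, b ≤ 1 ∧ q = 2 * q2 + b := ⟨q / 2, q % 2, by omega, by omega⟩
    have hq2 : q2 < 2 ^ n := by omega
    have h2 : 2 ^ (n + 1) = Nat.bit false (2 ^ n) := by
      simp [Nat.bit]; omega
    rcases Nat.le_one_iff_eq_zero_or_eq_one.mp hb with rfl | rfl
    · have h1 : 2 ^ (n + 1) + (2 * q2 + 0) = Nat.bit false (2 ^ n + q2) := by
        simp [Nat.bit]; omega
      rw [h1, h2, Nat.lor_bit, ih q2 hq2]
      simp [Nat.bit]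
    · have h1 : 2 ^ (n + 1) + (2 * q2 + 1) = Nat.bit true (2 ^ n + q2) := by
        simp [Nat.bit]; omega
      rw [h1, h2, Nat.lor_bit, ih q2 hq2]
      simp [Nat.bit]


theorem FN_lt (k : Nat) (a b : Int) : FN k a b < 4 ^ k := by
  induction k with
  | zero => simp [FN]
  | succ k ih =>
    have h1 := tbn_le a k
    have h2 := tbn_le b k
    have hp : (4:Nat) ^ (k+1) = 4 * 4 ^ k := by ring
    rw [FN, Finset.sum_range_succ, ← FN]
    have := ih
    nlinarith [this]

theorem FN_succ_top (k : Nat) (a b : Int) :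
    FN (k + 1) a b = FN k a b + (tbn a k + 2 * tbn b k) * 4 ^ k :=
  Finset.sum_range_succ _ _

theorem int_testBit_succ (m : Int) (i : Nat) : m.testBit (i + 1) = (m / 2).testBit i := by
  cases m with
  | ofNat a =>
    have h : (↑a : Int) / 2 = (↑(a / 2) : Int) := by rw [Int.natCast_div]; norm_num
    show (↑a : Int).testBit (i + 1) = ((↑a : Int) / 2).testBit i
    rw [h, int_testBit_natCast, int_testBit_natCast, Nat.testBit_add_one]
  | negSucc a =>
    have h : (Int.negSucc a) / 2 = Int.negSucc (a / 2) := by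
      rw [Int.negSucc_eq, Int.negSucc_eq]; omega
    rw [h, int_testBit_negSucc, int_testBit_negSucc, Nat.testBit_add_one]

theorem FN_succ_bot (k : Nat) (a b : Int) :
    FN (k + 1) a b = tbn a 0 + 2 * tbn b 0 + 4 * FN k (a / 2) (b / 2) := by
  rw [FN, Finset.sum_range_succ']
  have h : ∀ i, (tbn a (i+1) + 2 * tbn b (i+1)) * 4 ^ (i+1)
      = 4 * ((tbn (a/2) i + 2 * tbn (b/2) i) * 4 ^ i) := by
    intro i
    rw [tbn, tbn, int_testBit_succ, int_testBit_succ, ← tbn, ← tbn]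
    ring
  rw [Finset.sum_congr rfl (fun i _ => h i), ← Finset.mul_sum, ← FN]
  simp [tbn]
  ring

theorem FN_congr (k : Nat) (a b a' b' : Int)
    (ha : ∀ i, i < k → a.testBit i = a'.testBit i)
    (hb : ∀ i, i < k → b.testBit i = b'.testBit i) : FN k a b = FN k a' b' := by
  unfold FN
  refine Finset.sum_congr rfl (fun i hi => ?_)
  rw [Finset.mem_range] at hi
  rw [tbn, tbn, ha i hi, hb i hi, ← tbn, ← tbn]

theorem tbn_natCast_zero (a : Nat) : tbn ↑a 0 = a % 2 := by
  rw [tbn, int_testBit_natCast, Nat.testBit_zero]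
  rcases Nat.mod_two_eq_zero_or_one a with h | h <;> simp [h]

-- Source B's recursive interleave on non-negative arguments computes FN
theorem interleaveB_cast (k : Nat) : ∀ a b : Nat, a < 2 ^ k → b < 2 ^ k →
    interleaveB ↑a ↑b = ↑(FN k ↑a ↑b) := by
  induction k with
  | zero =>
    intro a b ha hb
    interval_cases a
    interval_cases b
    rw [interleaveB]
    simp [FN]
  | succ k ih =>
    intro a b ha hb
    have hp : 2 ^ (k + 1) = 2 * 2 ^ k := by ring
    by_cases hz : a = 0 ∧ b = 0
    · obtain ⟨rfl, rfl⟩ := hz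
      rw [interleaveB]
      have hz0 : ∀ i : Nat, Int.testBit 0 i = false := fun i => by
        rw [show (0 : Int) = ((0 : Nat) : Int) from rfl, int_testBit_natCast, Nat.zero_testBit]
      simp [FN, tbn, hz0]
    · rw [interleaveB, if_neg (by
        simp only [Nat.cast_pos, not_and, not_le]
        omega)]
      have hland : ∀ c : Nat, Int.land ↑c 1 = (↑(c % 2) : Int) := by
        intro c
        rw [show (1 : Int) = ((1 : Nat) : Int) from rfl, int_land_natCast, Nat.and_one_is_mod]
      have hshr : ∀ c : Nat, pyShr (↑c : Int) 1 = (↑(c / 2) : Int) := by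
        intro c
        rw [show (1 : Int) = ((1 : Nat) : Int) from rfl, natCast_pyShr]
        norm_num
      rw [hland a, hland b, hshr a, hshr b, ih (a / 2) (b / 2) (by omega) (by omega)]
      rw [FN_succ_bot]
      have hdiv : ∀ c : Nat, (↑c : Int) / 2 = ((↑(c / 2) : Nat) : Int) := by
        intro c; rw [Int.natCast_div]; norm_num
      rw [hdiv a, hdiv b, tbn_natCast_zero, tbn_natCast_zero]
      push_cast
      ring

-- A's while-loop: shift-accumulate from bit k-1 down to bit 0
theorem loopA_eq (k : Nat) : ∀ (r : Nat) (x y : Int),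
    pyLoopA k (Nat.cast (2 ^ k)) ↑r x y = ↑(r * 4 ^ k + FN k x y) := by
  induction k with
  | zero => intro r x y; simp [pyLoopA, FN]
  | succ k ih =>
    intro r x y
    have hp : 2 ^ (k + 1) = 2 * 2 ^ k := by ring
    show pyLoopA (k + 1) (Nat.cast (2 ^ (k + 1))) ↑r x y = _
    rw [pyLoopA]
    have hmask : pyShr (Nat.cast (2 ^ (k + 1))) 1 = (Nat.cast (2 ^ k) : Int) := by
      rw [show (1 : Int) = ((1 : Nat) : Int) from rfl, natCast_pyShr]
      congr 1
      omega
    simp only [hmask, pyShl_two, extract_bit]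
    rw [int_two_mul_lor r (tbn y k) (tbn_le y k),
        int_two_mul_lor (2 * r + tbn y k) (tbn x k) (tbn_le x k),
        ih (2 * (2 * r + tbn y k) + tbn x k) x y]
    have key : (2 * (2 * r + tbn y k) + tbn x k) * 4 ^ k + FN k x y
        = r * 4 ^ (k + 1) + FN (k + 1) x y := by
      rw [FN_succ_top]
      ring
    rw [key]


theorem lt_of_testBit_imp (n k : Nat) (h : ∀ i, n.testBit i = true → i < k) : n < 2 ^ k := by
  have h2 : n % 2 ^ k = n := by
    apply Nat.eq_of_testBit_eq
    intro i
    rw [Nat.testBit_mod_two_pow]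
    cases hb : n.testBit i
    · simp
    · simp [h i hb]
  have := Nat.mod_lt n (Nat.two_pow_pos k)
  omega

-- m &&& (2^k - 1) keeps the low k bits
theorem land_mask (m : Int) (k : Nat) : ∃ n : Nat,
    Int.land m (Nat.cast (2 ^ k - 1)) = ↑n ∧ n < 2 ^ k ∧
    ∀ i, n.testBit i = (decide (i < k) && m.testBit i) := by
  cases m with
  | ofNat a =>
    refine ⟨a % 2 ^ k, ?_, Nat.mod_lt _ (Nat.two_pow_pos k), fun i => ?_⟩
    · show Int.land (↑a) (Nat.cast (2 ^ k - 1)) = _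
      rw [int_land_natCast, Nat.and_two_pow_sub_one_eq_mod]
    · rw [Nat.testBit_mod_two_pow]
      rfl
  | negSucc a =>
    have hchar : ∀ i, (Nat.ldiff (2 ^ k - 1) a).testBit i
        = (decide (i < k) && (Int.negSucc a).testBit i) := by
      intro i
      rw [Nat.testBit_ldiff, Nat.testBit_two_pow_sub_one, int_testBit_negSucc]
    refine ⟨Nat.ldiff (2 ^ k - 1) a, rfl, ?_, hchar⟩
    apply lt_of_testBit_imp
    intro i hi
    rw [hchar i] at hi
    by_contra hik
    simp [show ¬ i < k from hik] at hi

-- the sentinel bit OR-ed onto the payload, against A's shifted accumulator seed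
theorem glue (L t M : Nat) (hL : L ≤ 16) (ht : t ≤ 1) (hM : M < 4 ^ L) :
    2 ^ (16 + L) ||| (t * 4 ^ L + M) = (2 ^ (16 - L) ||| t) * 4 ^ L + M := by
  have h4 : (4:Nat) ^ L = 2 ^ (2 * L) := by rw [pow_mul]; norm_num
  rw [h4] at hM ⊢
  interval_cases t
  · have hle : M < 2 ^ (16 + L) :=
      lt_of_lt_of_le hM (Nat.pow_le_pow_right (by norm_num) (by omega))
    rw [Nat.zero_mul, Nat.zero_add, pow_lor_of_lt _ M hle]
    have hz : 2 ^ (16 - L) ||| 0 = 2 ^ (16 - L) := by simp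
    rw [hz, ← pow_add]
    congr 2
    omega
  · by_cases h16 : L = 16
    · subst h16
      have hlhs := pow_lor_pow_add 32 M (by norm_num at hM ⊢; omega)
      have h11 : (2:Nat) ^ 0 ||| 1 = 1 := by decide
      norm_num [h11] at hlhs ⊢
      omega
    · have hlt : 1 * 2 ^ (2 * L) + M < 2 ^ (16 + L) := by
        have hstep : 2 ^ (2 * L) + M < 2 ^ (2 * L + 1) := by
          have : (2:Nat) ^ (2 * L + 1) = 2 * 2 ^ (2 * L) := by ring
          omega
        have : (2:Nat) ^ (2 * L + 1) ≤ 2 ^ (16 + L) :=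
          Nat.pow_le_pow_right (by norm_num) (by omega)
        omega
      rw [pow_lor_of_lt _ _ hlt]
      have h1lt : 1 < 2 ^ (16 - L) := Nat.one_lt_two_pow_iff.mpr (by omega)
      rw [pow_lor_of_lt _ 1 h1lt]
      have hpa : 2 ^ (16 - L) * 2 ^ (2 * L) = 2 ^ (16 + L) := by
        rw [← pow_add]; congr 1; omega
      rw [Nat.add_mul, Nat.one_mul, hpa]
      omega

theorem pyShl_one_natCast (k : Nat) : pyShl 1 (↑k) = (Nat.cast (2 ^ k) : Int) := by
  simp [pyShl]

-- bit i of x ^ 2^k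
theorem testBit_xor_pow (m : Int) (k i : Nat) :
    (Int.xor m (Nat.cast (2 ^ k))).testBit i = (m.testBit i).xor (decide (k = i)) := by
  rw [Int.testBit_lxor, int_testBit_natCast, Nat.testBit_two_pow]

-- bit i of y ^ (2^k - 1)
theorem testBit_xor_mask (m : Int) (k i : Nat) :
    (Int.xor m (Nat.cast (2 ^ k - 1))).testBit i = (m.testBit i).xor (decide (i < k)) := by
  rw [Int.testBit_lxor, int_testBit_natCast, Nat.testBit_two_pow_sub_one]

-- A's result for level ≥ 1
theorem A_char (L : Nat) (hL1 : 1 ≤ L) (hL16 : L ≤ 16) (x y : Int) :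
    to_packed_tile_id ↑L x y =
    ↑((2 ^ (16 - L) ||| tbn (Int.lnot x) L) * 4 ^ L +
      ((tbn x (L - 1) + 2 * tbn y (L - 1)) * 4 ^ (L - 1) + FN (L - 1) x (Int.lnot y))) := by
  have h2L : (2:Nat) ^ L = 2 * 2 ^ (L - 1) := by
    conv_lhs => rw [show L = (L - 1) + 1 by omega]
    ring
  have h15 : ((15:Int) - ↑L + 1) = ((16 - L : Nat) : Int) := by
    rw [Nat.cast_sub hL16]; push_cast; ring
  have hlv : ((L:Int) - 1) = ((L - 1 : Nat) : Int) := by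
    rw [Nat.cast_sub hL1]; push_cast; ring
  have hmask : pyShr (Nat.cast (2 ^ L)) 1 = (Nat.cast (2 ^ (L - 1)) : Int) := by
    rw [show (1 : Int) = ((1 : Nat) : Int) from rfl, natCast_pyShr]
    congr 1
    omega
  unfold to_packed_tile_id
  rw [if_pos (show ((L:Int) > 0) by exact_mod_cast hL1)]
  simp only [h15, hlv, pyShl_one_natCast, hmask, pyShl_two, extract_bit, Int.toNat_natCast,
    int_lor_natCast]
  rw [int_two_mul_lor _ (tbn y (L - 1)) (tbn_le y (L - 1)),
      int_two_mul_lor _ (tbn x (L - 1)) (tbn_le x (L - 1)), loopA_eq]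
  congr 1
  have h4L : (4:Nat) ^ L = 4 * 4 ^ (L - 1) := by
    conv_lhs => rw [show L = (L - 1) + 1 by omega]
    ring
  rw [h4L]
  ring

-- B's result for level ≥ 1
theorem B_char (L : Nat) (hL1 : 1 ≤ L) (x y : Int) :
    to_packed_tile_id_alt ↑L x y =
    ↑(2 ^ (16 + L) ||| (tbn (Int.lnot x) L * 4 ^ L +
      ((tbn x (L - 1) + 2 * tbn y (L - 1)) * 4 ^ (L - 1) + FN (L - 1) x (Int.lnot y)))) := by
  obtain ⟨K, rfl⟩ : ∃ K, L = K + 1 := ⟨L - 1, by omega⟩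
  have h2K : (2:Nat) ^ (K + 1) = 2 * 2 ^ K := by ring
  have harg1 : (((K + 1 : Nat) : Int) + 1) = ((K + 2 : Nat) : Int) := by push_cast; ring
  have harg2 : ((16:Int) + ((K + 1 : Nat) : Int)) = ((16 + (K + 1) : Nat) : Int) := by
    push_cast; ring
  have hs1 : (Nat.cast (2 ^ (K + 2)) : Int) - 1 = (Nat.cast (2 ^ (K + 2) - 1) : Int) := by
    rw [Nat.cast_sub (Nat.one_le_two_pow)]
    norm_num
  have hs2 : (Nat.cast (2 ^ (K + 1)) : Int) - 1 = (Nat.cast (2 ^ (K + 1) - 1) : Int) := by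
    rw [Nat.cast_sub (Nat.one_le_two_pow)]
    norm_num
  have hinner : pyShr (Nat.cast (2 ^ (K + 1) - 1) : Int) 1 = (Nat.cast (2 ^ K - 1) : Int) := by
    rw [show (1 : Int) = ((1 : Nat) : Int) from rfl, natCast_pyShr]
    congr 1
    omega
  unfold to_packed_tile_id_alt
  simp only [harg1, harg2, pyShl_one_natCast, hs1, hs2, hinner]
  obtain ⟨xn, hx1, hx2, hx3⟩ := land_mask (Int.xor x (Nat.cast (2 ^ (K + 1)))) (K + 2)
  obtain ⟨yn, hy1, hy2, hy3⟩ := land_mask (Int.xor y (Nat.cast (2 ^ K - 1))) (K + 1)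
  rw [hx1, hy1, interleaveB_cast (K + 2) xn yn (by omega) (by
    have : (2:Nat) ^ (K + 2) = 2 * 2 ^ (K + 1) := by ring
    omega), int_lor_natCast]
  congr 1
  -- now a pure Nat computation of the interleaved sum
  have hxbit : ∀ i, (↑xn : Int).testBit i
      = (decide (i < K + 2) && ((x.testBit i).xor (decide (K + 1 = i)))) := by
    intro i
    rw [int_testBit_natCast, hx3 i, testBit_xor_pow]
  have hybit : ∀ i, (↑yn : Int).testBit i
      = (decide (i < K + 1) && ((y.testBit i).xor (decide (i < K)))) := by
    intro i
    rw [int_testBit_natCast, hy3 i, testBit_xor_mask]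
  rw [FN_succ_top, FN_succ_top]
  have e1 : tbn (↑xn) (K + 1) = tbn (Int.lnot x) (K + 1) := by
    rw [tbn, tbn, hxbit, Int.testBit_lnot]
    simp
  have e2 : tbn (↑yn) (K + 1) = 0 := by
    rw [tbn, hybit]
    simp
  have e3 : tbn (↑xn) K = tbn x K := by
    rw [tbn, tbn, hxbit]
    simp
  have e4 : tbn (↑yn) K = tbn y K := by
    rw [tbn, tbn, hybit]
    simp
  have e5 : FN K (↑xn) (↑yn) = FN K x (Int.lnot y) := by
    apply FN_congr
    · intro i hi
      rw [hxbit]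
      simp [show i < K + 2 by omega, show K + 1 ≠ i by omega]
    · intro i hi
      rw [hybit, Int.testBit_lnot]
      simp [show i < K + 1 by omega, hi]
  rw [e1, e2, e3, e4, e5]
  simp only [Nat.add_sub_cancel]
  congr 1
  ring

-- ===== VERDICT (by name: the statement is the Claim_ definition above) =====
theorem to_packed_tile_id_spec : Claim_equal_to_packed_tile_id := by
  intro level x y _hDom hPre
  obtain ⟨h0, h16⟩ := hPre
  unfold Spec_to_packed_tile_id
  obtain ⟨L, rfl⟩ : ∃ L : Nat, level = ↑L := ⟨level.toNat, (Int.toNat_of_nonneg h0).symm⟩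
  have hL16 : L ≤ 16 := by exact_mod_cast h16
  rcases Nat.eq_zero_or_pos L with rfl | hL1
  · -- level = 0: no loop iterations; both sides are the sentinel OR the inverted bit 0 of x
    have h15 : ((15:Int) - ↑(0:Nat) + 1) = ((16 : Nat) : Int) := by norm_num
    unfold to_packed_tile_id
    rw [if_neg (by norm_num : ¬((↑(0:Nat) : Int) > 0))]
    rw [h15, pyShl_one_natCast, pyShl_one_natCast, extract_bit, int_lor_natCast]
    have harg1 : ((↑(0:Nat) : Int) + 1) = ((1 : Nat) : Int) := by norm_num
    have harg2 : ((16:Int) + (↑(0:Nat) : Int)) = ((16 + 0 : Nat) : Int) := by norm_num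
    have hs1 : (Nat.cast (2 ^ 1) : Int) - 1 = (Nat.cast (2 ^ 1 - 1) : Int) := by norm_num
    have hs0 : (Nat.cast (2 ^ 0) : Int) - 1 = (Nat.cast (2 ^ 0 - 1) : Int) := by norm_num
    have hinner : pyShr (Nat.cast (2 ^ 0 - 1) : Int) 1 = (Nat.cast (2 ^ 0 - 1) : Int) := by
      norm_num [pyShr]
    unfold to_packed_tile_id_alt
    simp only [harg1, harg2, pyShl_one_natCast, hs1, hs0, hinner]
    obtain ⟨xn, hx1, hx2, hx3⟩ := land_mask (Int.xor x (Nat.cast (2 ^ 0))) 1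
    obtain ⟨yn, hy1, hy2, hy3⟩ := land_mask (Int.xor y (Nat.cast (2 ^ 0 - 1))) 0
    have hyn : yn = 0 := by norm_num at hy2; omega
    rw [hx1, hy1, interleaveB_cast 1 xn yn (by norm_num at hx2 ⊢; omega) (by
      norm_num; omega), int_lor_natCast]
    congr 1
    have e1 : tbn (↑xn) 0 = tbn (Int.lnot x) 0 := by
      rw [tbn, tbn, int_testBit_natCast, hx3, testBit_xor_pow, Int.testBit_lnot]
      simp
    have e2 : tbn (↑yn) 0 = 0 := by rw [hyn, tbn_natCast_zero]
    rw [FN_succ_top, e1, e2]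
    simp [FN]
  · rw [A_char L hL1 hL16 x y, B_char L hL1 x y]
    have hM : (tbn x (L - 1) + 2 * tbn y (L - 1)) * 4 ^ (L - 1) + FN (L - 1) x (Int.lnot y)
        < 4 ^ L := by
      have hF := FN_lt (L - 1) x (Int.lnot y)
      have h1 := tbn_le x (L - 1)
      have h2 := tbn_le y (L - 1)
      have h4 : (4:Nat) ^ L = 4 * 4 ^ (L - 1) := by
        conv_lhs => rw [show L = (L - 1) + 1 by omega]
        ring
      have h3 : tbn x (L - 1) + 2 * tbn y (L - 1) ≤ 3 := by omega
      have := Nat.mul_le_mul_right (4 ^ (L - 1)) h3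
      omega
    rw [glue L (tbn (Int.lnot x) L) _ hL16 (tbn_le _ _) hM]
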